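-- pv_equiv track=rewrite | github.com/kelvinhuang0327/number-pattern-research | tools/gridsearch_echo_weight.py | structural_score
-- ===== SOURCE A (Python) =====
-- def structural_score(bet):
--     s = sum(bet)
--     odd = sum(1 for n in bet if n % 2 == 1)
--     zones = [0, 0, 0]
--     for n in bet:
--         if n <= 16: zones[0] += 1
--         elif n <= 33: zones[1] += 1
--         else: zones[2] += 1
--     consec = sum(1 for i in range(len(bet) - 1) if bet[i + 1] - bet[i] == 1)
--     spread = bet[-1] - bet[0]
--     sc = 0
--     if 100 <= s <= 200: sc += 2
--     if 120 <= s <= 180: sc += 2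
--     if 2 <= odd <= 4: sc += 2
--     if all(z >= 1 for z in zones): sc += 2
--     if consec <= 1: sc += 1
--     if spread >= 25: sc += 1
--     return sc
-- ===== SOURCE B (Python) =====
-- def structural_score(bet):
--     # single fused pass; the spread line still raises IndexError on empty input like A
--     spread = bet[-1] - bet[0]
--     s = odd = z0 = z1 = z2 = consec = 0
--     prev = None
--     for n in bet:
--         s += n
--         if n % 2 == 1:
--             odd += 1
--         if n <= 16:
--             z0 += 1
--         elif n <= 33:
--             z1 += 1
--         else:
--             z2 += 1
--         if prev is not None and n - prev == 1:
--             consec += 1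
--         prev = n
--     return ((2 if 100 <= s <= 200 else 0)
--             + (2 if 120 <= s <= 180 else 0)
--             + (2 if 2 <= odd <= 4 else 0)
--             + (2 if z0 >= 1 and z1 >= 1 and z2 >= 1 else 0)
--             + (1 if consec <= 1 else 0)
--             + (1 if spread >= 25 else 0))
-- ===== Notes on version B (the rewrite author's own statement) =====
-- stated objective: alternative
-- what changed: Fuses A's four separate linear passes (sum, odd-count generator, zone loop, indexed consecutive-pair scan) into one loop over bet that tracks all counters with a previous-element variable instead of indexing, and replaces the sequential sc-accumulator by a direct arithmetic sum of the six condition terms.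
import Mathlib
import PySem

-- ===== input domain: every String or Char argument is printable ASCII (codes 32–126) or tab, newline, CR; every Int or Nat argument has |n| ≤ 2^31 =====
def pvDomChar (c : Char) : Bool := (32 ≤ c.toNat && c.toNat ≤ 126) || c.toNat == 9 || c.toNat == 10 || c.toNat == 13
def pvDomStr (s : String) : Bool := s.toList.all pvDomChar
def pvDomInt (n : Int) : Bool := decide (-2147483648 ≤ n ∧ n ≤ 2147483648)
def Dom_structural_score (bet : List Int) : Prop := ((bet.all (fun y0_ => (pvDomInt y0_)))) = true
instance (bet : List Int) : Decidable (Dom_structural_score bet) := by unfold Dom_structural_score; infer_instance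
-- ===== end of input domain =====

-- B fuses A's four linear passes into one loop with a previous-element tracker instead of indexing (objective: alternative single-pass decomposition).

-- ===== PORT A =====
def structural_score (bet : List Int) : Int :=
  let s := bet.sum
  let odd := bet.foldl (fun a n => if PySem.Int.mod n 2 = 1 then a + 1 else a) (0 : Int)
  let zones := bet.foldl (fun (z : Int × Int × Int) n =>
      if n ≤ 16 then (z.1 + 1, z.2.1, z.2.2)
      else if n ≤ 33 then (z.1, z.2.1 + 1, z.2.2)
      else (z.1, z.2.1, z.2.2 + 1)) ((0, 0, 0) : Int × Int × Int)
  -- pyGetD is exact here: for every i produced by range(len(bet)-1), i and i+1 are in range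
  let consec := (PySem.List.pyRange 0 ((bet.length : Int) - 1) 1).foldl
      (fun a i => if PySem.List.pyGetD bet (i + 1) 0 - PySem.List.pyGetD bet i 0 = 1 then a + 1 else a) (0 : Int)
  -- last minus first element; Pre_ excludes the empty list, where Python raises IndexError
  let spread := PySem.List.pyGetD bet (-1) 0 - PySem.List.pyGetD bet 0 0
  let sc : Int := 0
  let sc := if 100 ≤ s ∧ s ≤ 200 then sc + 2 else sc
  let sc := if 120 ≤ s ∧ s ≤ 180 then sc + 2 else sc
  let sc := if 2 ≤ odd ∧ odd ≤ 4 then sc + 2 else sc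
  let sc := if zones.1 ≥ 1 ∧ zones.2.1 ≥ 1 ∧ zones.2.2 ≥ 1 then sc + 2 else sc
  let sc := if consec ≤ 1 then sc + 1 else sc
  let sc := if spread ≥ 25 then sc + 1 else sc
  sc

-- ===== PORT B =====
def structural_score_alt (bet : List Int) : Int :=
  -- last minus first element; exact inside Pre_ (nonempty list), like Source B
  let spread := PySem.List.pyGetD bet (-1) 0 - PySem.List.pyGetD bet 0 0
  let st := bet.foldl
    (fun (st : Int × Int × Int × Int × Int × Int × Option Int) n =>
      match st with
      | (s, odd, z0, z1, z2, consec, prev) =>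
        (s + n,
         if PySem.Int.mod n 2 = 1 then odd + 1 else odd,
         if n ≤ 16 then z0 + 1 else z0,
         if n ≤ 16 then z1 else if n ≤ 33 then z1 + 1 else z1,
         if n ≤ 16 then z2 else if n ≤ 33 then z2 else z2 + 1,
         (match prev with
          | some p => if n - p = 1 then consec + 1 else consec
          | none => consec),
         some n))
    ((0, 0, 0, 0, 0, 0, none) : Int × Int × Int × Int × Int × Int × Option Int)
  match st with
  | (s, odd, z0, z1, z2, consec, _) =>
    (if 100 ≤ s ∧ s ≤ 200 then (2 : Int) else 0)
    + (if 120 ≤ s ∧ s ≤ 180 then (2 : Int) else 0)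
    + (if 2 ≤ odd ∧ odd ≤ 4 then (2 : Int) else 0)
    + (if z0 ≥ 1 ∧ z1 ≥ 1 ∧ z2 ≥ 1 then (2 : Int) else 0)
    + (if consec ≤ 1 then (1 : Int) else 0)
    + (if spread ≥ 25 then (1 : Int) else 0)

-- ===== PRECONDITION & SPEC =====
-- Pre_ excludes only the empty list, on which A raises IndexError reading the last element
def Pre_structural_score (bet : List Int) : Prop := bet ≠ []
instance (bet : List Int) : Decidable (Pre_structural_score bet) := by unfold Pre_structural_score; infer_instance
def pvWitness_structural_score : List Int := [1, 20, 40, 41]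
def Spec_structural_score (bet : List Int) (out : Int) : Prop := out = structural_score_alt bet
instance (bet : List Int) (out : Int) : Decidable (Spec_structural_score bet out) := by unfold Spec_structural_score; infer_instance

-- ===== CLAIM (what is proved, stated in full; the proofs are below) =====
def Claim_equal_structural_score : Prop := ∀ (bet : List Int), Dom_structural_score bet → Pre_structural_score bet → Spec_structural_score bet (structural_score bet)

-- ===== LEMMAS AND PROOFS =====

-- count of adjacent pairs differing by exactly 1, with an optional pending previous element
def adjP : Option Int → List Int → Int
  | _, [] => 0
  | none, n :: t => adjP (some n) t
  | some p, n :: t => (if n - p = 1 then adjP (some n) t + 1 else adjP (some n) t)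

def lastP : Option Int → List Int → Option Int
  | prev, [] => prev
  | _, n :: t => lastP (some n) t

-- B's single fold, characterised componentwise
lemma altFold (l : List Int) (s odd z0 z1 z2 consec : Int) (prev : Option Int) :
    l.foldl
      (fun (st : Int × Int × Int × Int × Int × Int × Option Int) n =>
        match st with
        | (s, odd, z0, z1, z2, consec, prev) =>
          (s + n,
           if PySem.Int.mod n 2 = 1 then odd + 1 else odd,
           if n ≤ 16 then z0 + 1 else z0,
           if n ≤ 16 then z1 else if n ≤ 33 then z1 + 1 else z1,
           if n ≤ 16 then z2 else if n ≤ 33 then z2 else z2 + 1,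
           (match prev with
            | some p => if n - p = 1 then consec + 1 else consec
            | none => consec),
           some n)) (s, odd, z0, z1, z2, consec, prev)
    = (s + l.sum,
       odd + (l.countP (fun n => decide (PySem.Int.mod n 2 = 1)) : Int),
       z0 + (l.countP (fun n => decide (n ≤ 16)) : Int),
       z1 + (l.countP (fun n => decide (¬ n ≤ 16 ∧ n ≤ 33)) : Int),
       z2 + (l.countP (fun n => decide (¬ n ≤ 16 ∧ ¬ n ≤ 33)) : Int),
       consec + adjP prev l,
       lastP prev l) := by
  induction l generalizing s odd z0 z1 z2 consec prev with
  | nil => simp [adjP, lastP]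
  | cons x t ih =>
    cases prev with
    | none =>
      simp only [List.foldl_cons]
      rw [ih]
      simp only [adjP, lastP, List.sum_cons, List.countP_cons, decide_eq_true_eq, Prod.mk.injEq]
      split_ifs <;> ((repeat' apply And.intro) <;> (try trivial) <;> (push_cast; omega))
    | some p =>
      simp only [List.foldl_cons]
      rw [ih]
      simp only [adjP, lastP, List.sum_cons, List.countP_cons, decide_eq_true_eq, Prod.mk.injEq]
      split_ifs <;> ((repeat' apply And.intro) <;> (try trivial) <;> (push_cast; omega))

-- A's zone loop, characterised componentwise
lemma zonesFold (l : List Int) (z0 z1 z2 : Int) :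
    l.foldl (fun (z : Int × Int × Int) n =>
      if n ≤ 16 then (z.1 + 1, z.2.1, z.2.2)
      else if n ≤ 33 then (z.1, z.2.1 + 1, z.2.2)
      else (z.1, z.2.1, z.2.2 + 1)) (z0, z1, z2)
    = (z0 + (l.countP (fun n => decide (n ≤ 16)) : Int),
       z1 + (l.countP (fun n => decide (¬ n ≤ 16 ∧ n ≤ 33)) : Int),
       z2 + (l.countP (fun n => decide (¬ n ≤ 16 ∧ ¬ n ≤ 33)) : Int)) := by
  induction l generalizing z0 z1 z2 with
  | nil => simp
  | cons x t ih =>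
    simp only [List.foldl_cons]
    split_ifs with h h2 <;>
      (rw [ih]; simp only [List.countP_cons, decide_eq_true_eq, Prod.mk.injEq]; split_ifs <;> (push_cast; omega))

-- A's indexed consecutive scan over range(len-1), in Nat-range form
lemma consecFoldNat (l : List Int) (c : Int) :
    (List.range (l.length - 1)).foldl
      (fun (a : Int) (k : Nat) =>
        if PySem.List.pyGetD l ((k : Int) + 1) 0 - PySem.List.pyGetD l (k : Int) 0 = 1 then a + 1 else a) c
    = c + adjP none l := by
  induction l generalizing c with
  | nil => simp [adjP]
  | cons x t ih =>
    cases t with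
    | nil => simp [adjP]
    | cons y t' =>
      have hlen : (x :: y :: t').length - 1 = ((y :: t').length - 1) + 1 := by simp
      rw [hlen, List.range_succ_eq_map, List.foldl_cons, List.foldl_map]
      have hfun : (fun (a : Int) (k : Nat) =>
          if PySem.List.pyGetD (x :: y :: t') ((↑(Nat.succ k) : Int) + 1) 0
             - PySem.List.pyGetD (x :: y :: t') (↑(Nat.succ k) : Int) 0 = 1 then a + 1 else a)
          = (fun (a : Int) (k : Nat) =>
          if PySem.List.pyGetD (y :: t') ((k : Int) + 1) 0
             - PySem.List.pyGetD (y :: t') (k : Int) 0 = 1 then a + 1 else a) := by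
        funext a k
        have h1 : ((Nat.succ k : Nat) : Int) + 1 = ((k + 2 : Nat) : Int) := by push_cast; ring
        have h2 : ((k : Int) + 1) = ((k + 1 : Nat) : Int) := by push_cast; ring
        rw [h1, show ((Nat.succ k : Nat) : Int) = ((k + 1 : Nat) : Int) by push_cast; ring, h2,
            PySem.List.pyGetD_natCast, PySem.List.pyGetD_natCast,
            PySem.List.pyGetD_natCast, PySem.List.pyGetD_natCast]
        rfl
      rw [hfun, ih]
      have h0 : PySem.List.pyGetD (x :: y :: t') ((↑(0 : Nat) : Int) + 1) 0
          - PySem.List.pyGetD (x :: y :: t') (↑(0 : Nat) : Int) 0 = y - x := by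
        rw [show ((0 : Nat) : Int) + 1 = ((1 : Nat) : Int) by norm_num,
            PySem.List.pyGetD_natCast, PySem.List.pyGetD_natCast]
        rfl
      rw [h0]
      have hadj : adjP none (x :: y :: t') = (if y - x = 1 then (1 : Int) else 0) + adjP none (y :: t') := by
        simp only [adjP]
        by_cases h : y - x = 1 <;> (simp [h]; try ring)
      rw [hadj]
      by_cases h : y - x = 1 <;> (simp [h]; try ring)

-- A's consecutive scan: pyRange form reduces to the Nat-range form
lemma consecFold (l : List Int) :
    (PySem.List.pyRange 0 ((l.length : Int) - 1) 1).foldl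
      (fun (a : Int) (i : Int) =>
        if PySem.List.pyGetD l (i + 1) 0 - PySem.List.pyGetD l i 0 = 1 then a + 1 else a) (0 : Int)
    = adjP none l := by
  rw [PySem.List.pyRange_one, List.foldl_map,
      show (((l.length : Int) - 1) - 0).toNat = l.length - 1 by omega]
  have hfun : (fun (a : Int) (k : Nat) =>
      if PySem.List.pyGetD l ((0 : Int) + (k : Int) + 1) 0 - PySem.List.pyGetD l ((0 : Int) + (k : Int)) 0 = 1
      then a + 1 else a)
      = (fun (a : Int) (k : Nat) =>
      if PySem.List.pyGetD l ((k : Int) + 1) 0 - PySem.List.pyGetD l (k : Int) 0 = 1 then a + 1 else a) := by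
    funext a k
    rw [show (0 : Int) + (k : Int) = (k : Int) by ring]
  rw [hfun, consecFoldNat]
  ring

-- ===== VERDICT (by name: the statement is the Claim_ definition above) =====
theorem structural_score_spec : Claim_equal_structural_score := by
  intro bet _ _
  unfold Spec_structural_score structural_score structural_score_alt
  rw [altFold, zonesFold, consecFold, PySem.List.foldl_ite_add_one]
  simp only [zero_add]
  split_ifs <;> ring
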